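-- pv_equiv track=rewrite | github.com/ja153903/binary_search | binary_search/easy/shortest_string.py | solve
-- ===== SOURCE A (Python) =====
-- def solve(s: str) -> int:
--     """
--     11000 => 1 left
--     """
--     num_ones, num_zeros = 0, 0
--     for digit in s:
--         if digit == "1":
--             num_ones += 1
--         else:
--             num_zeros += 1
--
--     return abs(num_ones - num_zeros)
-- ===== SOURCE B (Python) =====
-- def solve(s: str) -> int:
--     # Pair-cancellation with a stack: each char either cancels a stored
--     # opposite-class char or is pushed; the leftover stack is homogeneous
--     # and its size equals |#ones - #others|.
--     stack = []
--     for c in s: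
--         b = (c == "1")
--         if stack and stack[-1] != b:
--             stack.pop()
--         else:
--             stack.append(b)
--     return len(stack)
-- ===== Notes on version B (the rewrite author's own statement) =====
-- stated objective: alternative
-- what changed: Replaces the two-counter tally with stack-based pair cancellation: each character cancels one stored character of the opposite class or is pushed, and the answer is the leftover stack size (no counters, no abs).
import Mathlib
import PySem

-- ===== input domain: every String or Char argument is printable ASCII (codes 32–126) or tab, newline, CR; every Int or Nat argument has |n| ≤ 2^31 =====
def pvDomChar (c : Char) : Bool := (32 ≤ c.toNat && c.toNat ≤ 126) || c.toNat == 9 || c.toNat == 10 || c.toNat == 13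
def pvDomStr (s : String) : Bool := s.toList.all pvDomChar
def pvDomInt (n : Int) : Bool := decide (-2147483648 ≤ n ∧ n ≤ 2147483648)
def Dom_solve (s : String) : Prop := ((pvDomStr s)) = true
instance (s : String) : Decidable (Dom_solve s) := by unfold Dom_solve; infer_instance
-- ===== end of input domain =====

-- B replaces A's two-counter tally with stack-based pair cancellation (alternative algorithm, same cost).

-- ===== PORT A =====
def solve (s : String) : Int :=
  let p := s.toList.foldl (fun (acc : Int × Int) digit =>
    if digit == '1' then (acc.1 + 1, acc.2) else (acc.1, acc.2 + 1)) (0, 0)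
  |p.1 - p.2|

-- ===== PORT B =====
-- stack modelled with its top at the list head; only the top is ever accessed
-- and only the length is returned, so this is exact.
def solveAltStep (st : List Bool) (c : Char) : List Bool :=
  let b := c == '1'
  match st with
  | t :: rest => if t != b then rest else b :: t :: rest
  | [] => [b]

def solve_alt (s : String) : Int :=
  let st := s.toList.foldl solveAltStep ([] : List Bool)
  (st.length : Int)

-- ===== PRECONDITION & SPEC =====
def Spec_solve (s : String) (out : Int) : Prop := out = solve_alt s
instance (s : String) (out : Int) : Decidable (Spec_solve s out) := by unfold Spec_solve; infer_instance

-- ===== CLAIM (what is proved, stated in full; the proofs are below) =====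
def Claim_equal_solve : Prop := ∀ (s : String), Dom_solve s → Spec_solve s (solve s)

-- ===== LEMMAS AND PROOFS =====

-- A's two-counter fold, characterised: ones = count '1', zeros = length - count '1'.
theorem pairFold_eq (l : List Char) (a b : Int) :
    l.foldl (fun (acc : Int × Int) digit =>
      if digit == '1' then (acc.1 + 1, acc.2) else (acc.1, acc.2 + 1)) (a, b)
      = (a + l.count '1', b + (l.length - l.count '1' : Int)) := by
  induction l generalizing a b with
  | nil => simp
  | cons c t ih =>
    rw [List.foldl_cons]
    by_cases h : c = '1'
    · rw [if_pos (by simp [h]), ih]; simp [h, Prod.ext_iff]; omega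
    · rw [if_neg (by simp [h]), ih]; simp [h, Prod.ext_iff]; omega

-- signed value of the stack: #true − #false
def svalB (st : List Bool) : Int := (st.count true : Int) - st.count false

theorem step_sval (st : List Bool) (c : Char) :
    svalB (solveAltStep st c) = svalB st + (if c == '1' then 1 else -1) := by
  cases st with
  | nil => cases h : (c == '1') <;> simp [solveAltStep, svalB, h]
  | cons t rest =>
    cases t <;> cases h : (c == '1') <;>
      simp [solveAltStep, svalB, h] <;> ring

theorem fold_sval (l : List Char) (st : List Bool) :
    svalB (l.foldl solveAltStep st)
      = svalB st + (l.count '1' : Int) - ((l.length : Int) - l.count '1') := by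
  induction l generalizing st with
  | nil => simp
  | cons c t ih =>
    rw [List.foldl_cons, ih, step_sval]
    by_cases h : c = '1'
    · simp [h]; ring
    · rw [if_neg (by simp [h])]
      simp [h]; ring

-- the stack stays homogeneous: it is always a replicate
theorem step_replicate (n : ℕ) (b : Bool) (c : Char) :
    ∃ m b', solveAltStep (List.replicate n b) c = List.replicate m b' := by
  cases n with
  | zero => exact ⟨1, c == '1', rfl⟩
  | succ k =>
    by_cases h : b = (c == '1')
    · exact ⟨k + 2, b, by simp [solveAltStep, List.replicate_succ, h]⟩
    · exact ⟨k, b, by simp [solveAltStep, List.replicate_succ, h]⟩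

theorem fold_replicate (l : List Char) (n : ℕ) (b : Bool) :
    ∃ m b', l.foldl solveAltStep (List.replicate n b) = List.replicate m b' := by
  induction l generalizing n b with
  | nil => exact ⟨n, b, rfl⟩
  | cons c t ih =>
    obtain ⟨m, b', h⟩ := step_replicate n b c
    obtain ⟨m', b'', h'⟩ := ih m b'
    exact ⟨m', b'', by rw [List.foldl_cons, h, h']⟩

theorem replicate_len_abs (n : ℕ) (b : Bool) :
    ((List.replicate n b).length : Int) = |svalB (List.replicate n b)| := by
  cases b <;> simp [svalB, List.count_replicate]

-- ===== VERDICT (by name: the statement is the Claim_ definition above) =====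
theorem solve_spec : Claim_equal_solve := by
  intro s _
  unfold Spec_solve solve solve_alt
  obtain ⟨m, b, h⟩ := fold_replicate s.toList 0 true
  rw [pairFold_eq]
  have hs := fold_sval s.toList []
  rw [List.replicate_zero] at h
  rw [h] at hs ⊢
  rw [replicate_len_abs, hs]
  simp only [svalB]
  simp
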